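-- pv_equiv track=rewrite | github.com/GaurangMhatre31/-RAG-System- | app.py | extract_sources_from_context
-- ===== SOURCE A (Python) =====
-- from typing import List, Dict, Any, Tuple, Optional, Set
--
-- def extract_sources_from_context(context: str) -> List[Dict[str, str]]:
--     """Extract source references from formatted context."""
--     sources = []
--     current_source = {}
--
--     for line in context.split('\n'):
--         line = line.strip()
--         if line.startswith('[ID:'):
--             if current_source:
--                 sources.append(current_source)
--             current_source = {'id': line[4:-1]}  # Extract ID
--         elif line.startswith('source_name:'):
--             current_source['source_name'] = line.split(':', 1)[1].strip()
--         elif line.startswith('page_start:'):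
--             parts = line.split()
--             current_source['page_start'] = parts[1] if len(parts) > 1 else '1'
--             if 'page_end:' in line:
--                 current_source['page_end'] = parts[3] if len(parts) > 3 else current_source['page_start']
--         elif line.startswith('section:'):
--             current_source['section'] = line.split(':', 1)[1].strip()
--
--     if current_source:
--         sources.append(current_source)
--
--     # Remove duplicates and ensure all fields
--     unique_sources = []
--     seen = set()
--     for source in sources:
--         key = (source.get('source_name', ''), source.get('page_start', ''))
--         if key not in seen:
--             seen.add(key)
--             # Ensure all required fields
--             source.setdefault('page_end', source.get('page_start', '1'))
--             source.setdefault('section', '-')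
--             unique_sources.append(source)
--
--     return unique_sources
-- ===== SOURCE B (Python) =====
-- def extract_sources_from_context(context):
--     """Extract source references from formatted context (two-pass: partition into blocks, parse, dedup)."""
--     lines = [ln.strip() for ln in context.split('\n')]
--
--     # Pass 1: partition lines into blocks, a new block starting at each '[ID:' line.
--     blocks = []
--     block = []
--     for ln in lines:
--         if ln.startswith('[ID:'):
--             blocks.append(block)
--             block = [ln]
--         else:
--             block.append(ln)
--     blocks.append(block)
--
--     # Pass 2: parse each block into a record; empty records are dropped.
--     records = []
--     for blk in blocks:
--         rec = parse_block(blk)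
--         if rec:
--             records.append(rec)
--
--     # Pass 3: first-occurrence dedup on (source_name, page_start) via an ordered dict.
--     by_key = {}
--     for rec in records:
--         key = (rec.get('source_name', ''), rec.get('page_start', ''))
--         if key not in by_key:
--             rec.setdefault('page_end', rec.get('page_start', '1'))
--             rec.setdefault('section', '-')
--             by_key[key] = rec
--     return list(by_key.values())
--
--
-- def parse_block(blk):
--     rec = {}
--     for ln in blk:
--         if ln.startswith('[ID:'):
--             rec['id'] = ln[4:-1]
--         elif ln.startswith('source_name:'):
--             rec['source_name'] = ln.split(':', 1)[1].strip()
--         elif ln.startswith('page_start:'):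
--             parts = ln.split()
--             rec['page_start'] = parts[1] if len(parts) > 1 else '1'
--             if 'page_end:' in ln:
--                 rec['page_end'] = parts[3] if len(parts) > 3 else rec['page_start']
--         elif ln.startswith('section:'):
--             rec['section'] = ln.split(':', 1)[1].strip()
--     return rec
-- ===== Notes on version B (the rewrite author's own statement) =====
-- stated objective: alternative
-- what changed: B replaces A's single stateful fold (threading a current-source dict and flushing it at each ID-marker line and at EOF) by three independent passes: partition the stripped lines into ID-marker-delimited blocks, parse each block into a record, then dedup on (source_name, page_start) through an ordered dict keyed by that pair instead of A's seen-set plus output list.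
import Mathlib
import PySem

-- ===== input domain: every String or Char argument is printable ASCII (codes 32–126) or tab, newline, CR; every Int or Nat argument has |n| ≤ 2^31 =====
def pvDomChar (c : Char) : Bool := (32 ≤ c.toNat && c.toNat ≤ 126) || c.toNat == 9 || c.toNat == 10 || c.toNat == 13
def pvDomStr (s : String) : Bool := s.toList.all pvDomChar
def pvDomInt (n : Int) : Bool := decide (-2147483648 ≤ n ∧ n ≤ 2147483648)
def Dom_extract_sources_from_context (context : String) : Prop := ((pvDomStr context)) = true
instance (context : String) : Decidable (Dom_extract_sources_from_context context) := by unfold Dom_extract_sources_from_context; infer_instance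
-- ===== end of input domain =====

-- B re-parses the context in three separate passes (partition into ID-marker blocks, parse each
-- block, dedup through an ordered dict) instead of A's single fold threading a current dict;
-- objective: alternative decomposition, same asymptotic cost.

-- ===== PORT A =====

-- the body of A's loop, on the already-stripped line (A strips first thing in the loop)
def pvStepCore (st : List (PySem.Dict String String) × PySem.Dict String String) (line : String) :
    List (PySem.Dict String String) × PySem.Dict String String :=
  if PySem.Str.startswith line "[ID:" then
    ((if st.2.items = [] then st.1 else st.1 ++ [st.2]),
     (PySem.Dict.empty).insert "id" (PySem.Str.slice line (some 4) (some (-1))))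
  else if PySem.Str.startswith line "source_name:" then
    -- line starts with "source_name:", so split(':',1) has a second part; getD is exact here
    (st.1, st.2.insert "source_name" (PySem.Str.strip (((PySem.Str.splitMax? line ":" 1).getD []).getD 1 "")))
  else if PySem.Str.startswith line "page_start:" then
    let parts := PySem.Str.split₀ line
    let ps := if parts.length > 1 then parts.getD 1 "" else "1"
    let d1 := st.2.insert "page_start" ps
    (st.1,
      if PySem.Str.isIn "page_end:" line then
        d1.insert "page_end" (if parts.length > 3 then parts.getD 3 "" else d1.getD "page_start" "")
      else d1)
  else if PySem.Str.startswith line "section:" then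
    (st.1, st.2.insert "section" (PySem.Str.strip (((PySem.Str.splitMax? line ":" 1).getD []).getD 1 "")))
  else st

def pvStepA (st : List (PySem.Dict String String) × PySem.Dict String String) (line0 : String) :
    List (PySem.Dict String String) × PySem.Dict String String :=
  pvStepCore st (PySem.Str.strip line0)

def pvDedupStepA (acc : PySem.Set (String × String) × List (PySem.Dict String String))
    (source : PySem.Dict String String) :
    PySem.Set (String × String) × List (PySem.Dict String String) :=
  let key := (source.getD "source_name" "", source.getD "page_start" "")
  if acc.1.contains key then acc
  else (acc.1.add key,
        acc.2 ++ [(source.setdefault "page_end" (source.getD "page_start" "1")).setdefault "section" "-"])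

def extract_sources_from_context (context : String) : List (List (String × String)) :=
  let st := ((PySem.Str.split? context "\n").getD []).foldl pvStepA ([], PySem.Dict.empty)
  let sources := if st.2.items = [] then st.1 else st.1 ++ [st.2]
  let fin := sources.foldl pvDedupStepA (PySem.Set.empty, [])
  fin.2.map PySem.Dict.items

-- ===== PORT B =====

-- parse_block's per-line dispatch (lines arrive already stripped in B)
def pvParseLineB (r : PySem.Dict String String) (ln : String) : PySem.Dict String String :=
  if PySem.Str.startswith ln "[ID:" then
    r.insert "id" (PySem.Str.slice ln (some 4) (some (-1)))
  else if PySem.Str.startswith ln "source_name:" then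
    r.insert "source_name" (PySem.Str.strip (((PySem.Str.splitMax? ln ":" 1).getD []).getD 1 ""))
  else if PySem.Str.startswith ln "page_start:" then
    let parts := PySem.Str.split₀ ln
    let ps := if parts.length > 1 then parts.getD 1 "" else "1"
    let r1 := r.insert "page_start" ps
    if PySem.Str.isIn "page_end:" ln then
      r1.insert "page_end" (if parts.length > 3 then parts.getD 3 "" else r1.getD "page_start" "")
    else r1
  else if PySem.Str.startswith ln "section:" then
    r.insert "section" (PySem.Str.strip (((PySem.Str.splitMax? ln ":" 1).getD []).getD 1 ""))
  else r

def pvParseBlock (blk : List String) : PySem.Dict String String :=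
  blk.foldl pvParseLineB PySem.Dict.empty

-- pass 1: partition the stripped lines into blocks, a new block at each '[ID:' line
def pvBlocksGo : List String → List String → List (List String)
  | [], block => [block]
  | ln :: rest, block =>
      if PySem.Str.startswith ln "[ID:" then block :: pvBlocksGo rest [ln]
      else pvBlocksGo rest (block ++ [ln])

def pvDedupStepB (d : PySem.Dict (String × String) (PySem.Dict String String))
    (r : PySem.Dict String String) : PySem.Dict (String × String) (PySem.Dict String String) :=
  let key := (r.getD "source_name" "", r.getD "page_start" "")
  if d.contains key then d
  else d.insert key ((r.setdefault "page_end" (r.getD "page_start" "1")).setdefault "section" "-")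

def extract_sources_from_context_alt (context : String) : List (List (String × String)) :=
  let lines := ((PySem.Str.split? context "\n").getD []).map PySem.Str.strip
  let blocks := pvBlocksGo lines []
  let records := blocks.foldl
    (fun acc blk => let r := pvParseBlock blk; if r.items = [] then acc else acc ++ [r]) []
  let byKey := records.foldl pvDedupStepB PySem.Dict.empty
  byKey.values.map PySem.Dict.items

-- ===== PRECONDITION & SPEC =====
def Spec_extract_sources_from_context (context : String) (out : List (List (String × String))) : Prop := out = extract_sources_from_context_alt context
instance (context : String) (out : List (List (String × String))) : Decidable (Spec_extract_sources_from_context context out) := by unfold Spec_extract_sources_from_context; infer_instance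

-- ===== CLAIM (what is proved, stated in full; the proofs are below) =====
def Claim_equal_extract_sources_from_context : Prop := ∀ (context : String), Dom_extract_sources_from_context context → Spec_extract_sources_from_context context (extract_sources_from_context context)

-- ===== LEMMAS AND PROOFS =====

-- on a line not starting with '[ID:', A's loop body keeps sources and updates the current
-- record exactly as B's parse_block dispatch does
lemma pvStepCore_of_not_id (st : List (PySem.Dict String String) × PySem.Dict String String)
    (line : String) (h : PySem.Str.startswith line "[ID:" = false) :
    pvStepCore st line = (st.1, pvParseLineB st.2 line) := by
  have h' : PySem.Chars.startswith line.toList ['[', 'I', 'D', ':'] = false := by simpa using h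
  simp only [pvStepCore, pvParseLineB]
  simp [h']
  split_ifs <;> rfl

-- on a '[ID:' line, parse_block's first step builds exactly A's fresh {'id': …} dict
lemma pvParseBlock_id (line : String) (h : PySem.Str.startswith line "[ID:" = true) :
    pvParseBlock [line]
      = (PySem.Dict.empty).insert "id" (PySem.Str.slice line (some 4) (some (-1))) := by
  have h' : PySem.Chars.startswith line.toList ['[', 'I', 'D', ':'] = true := by simpa using h
  simp [pvParseBlock, pvParseLineB, h']

def pvFinalize (st : List (PySem.Dict String String) × PySem.Dict String String) :
    List (PySem.Dict String String) :=
  if st.2.items = [] then st.1 else st.1 ++ [st.2]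

def pvAppendRec (acc : List (PySem.Dict String String)) (blk : List String) :
    List (PySem.Dict String String) :=
  let r := pvParseBlock blk
  if r.items = [] then acc else acc ++ [r]

-- the heart: A's one-pass fold, finalized, = B's block partition mapped through parse_block
lemma pvBlocks_eq : ∀ (lines blk : List String) (srcs : List (PySem.Dict String String)),
    pvFinalize (lines.foldl pvStepCore (srcs, pvParseBlock blk))
      = (pvBlocksGo lines blk).foldl pvAppendRec srcs := by
  intro lines
  induction lines with
  | nil => intro blk srcs; simp [pvBlocksGo, pvFinalize, pvAppendRec]
  | cons l ls ih =>
    intro blk srcs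
    by_cases h : PySem.Str.startswith l "[ID:" = true
    · have hstep : pvStepCore (srcs, pvParseBlock blk) l
          = (pvFinalize (srcs, pvParseBlock blk), pvParseBlock [l]) := by
        have h2 : PySem.Chars.startswith l.toList ['[', 'I', 'D', ':'] = true := by simpa using h
        simp [pvStepCore, h2, pvFinalize, pvParseBlock_id l h]
      simp only [List.foldl_cons, hstep, ih [l], pvBlocksGo, h, if_true]
      congr 1
    · have h' : PySem.Str.startswith l "[ID:" = false := by simpa using h
      have hstep : pvStepCore (srcs, pvParseBlock blk) l
          = (srcs, pvParseBlock (blk ++ [l])) := by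
        rw [pvStepCore_of_not_id _ _ h']
        simp [pvParseBlock]
      simp only [List.foldl_cons, hstep, ih (blk ++ [l]), pvBlocksGo, h', Bool.false_eq_true,
        if_false]

-- the dedup passes agree: A's (seen-set, list) fold produces exactly the values of B's
-- ordered dict keyed by (source_name, page_start)
lemma pvDedup_eq : ∀ (srcs : List (PySem.Dict String String))
    (seen : PySem.Set (String × String)) (uniq : List (PySem.Dict String String))
    (d : PySem.Dict (String × String) (PySem.Dict String String)),
    (∀ k, seen.contains k = d.contains k) → uniq = d.values →
    (srcs.foldl pvDedupStepA (seen, uniq)).2 = (srcs.foldl pvDedupStepB d).values := by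
  intro srcs
  induction srcs with
  | nil => intro seen uniq d _ h2; simpa using h2
  | cons s rest ih =>
    intro seen uniq d h1 h2
    simp only [List.foldl_cons, pvDedupStepA, pvDedupStepB]
    set key := (s.getD "source_name" "", s.getD "page_start" "") with hkey
    by_cases hc : d.contains key = true
    · simp only [h1 key, hc, if_true]
      exact ih seen uniq d h1 h2
    · have hc' : d.contains key = false := by simpa using hc
      simp only [h1 key, hc', Bool.false_eq_true, if_false]
      apply ih
      · intro k
        have : (seen.add key).contains k = (decide (k ∈ seen) || decide (k = key)) := by
          simp [PySem.Set.contains_eq_listContains, List.contains_eq_mem, PySem.Set.mem_add,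
            Bool.decide_or]
        rw [this, PySem.Dict.contains_insert]
        have hs : decide (k ∈ seen) = d.contains k := by
          rw [← h1 k]; simp [PySem.Set.contains_eq_listContains, List.contains_eq_mem]
        rw [hs, Bool.or_comm]
        congr 1
        exact (Bool.beq_eq_decide_eq k key).symm
      · simp only [PySem.Dict.values, PySem.Dict.items_insert_of_not_contains d _ hc',
          List.map_append, List.map_cons, List.map_nil]
        rw [h2]; rfl

-- ===== VERDICT (by name: the statement is the Claim_ definition above) =====
theorem extract_sources_from_context_spec : Claim_equal_extract_sources_from_context := by
  unfold Claim_equal_extract_sources_from_context Spec_extract_sources_from_context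
  intro context _
  simp only [extract_sources_from_context, extract_sources_from_context_alt]
  have hmap : ∀ (lines : List String)
      (st : List (PySem.Dict String String) × PySem.Dict String String),
      lines.foldl pvStepA st = (lines.map PySem.Str.strip).foldl pvStepCore st := by
    intro lines st
    rw [List.foldl_map]
    rfl
  rw [hmap]
  have hempty : (PySem.Dict.empty : PySem.Dict String String) = pvParseBlock [] := rfl
  rw [hempty]
  have h1 := pvBlocks_eq (((PySem.Str.split? context "\n").getD []).map PySem.Str.strip) [] []
  simp only [pvFinalize] at h1
  rw [h1]
  have h2 := pvDedup_eq
    ((pvBlocksGo (((PySem.Str.split? context "\n").getD []).map PySem.Str.strip) []).foldl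
      pvAppendRec [])
    PySem.Set.empty [] PySem.Dict.empty
    (by intro k; rfl) (by rfl)
  rw [h2]
  rfl
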